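-- pv_equiv track=rewrite | github.com/jiesutd/AllergicEvent | Analysis/data_distribution.py | extract_length_distribution
-- ===== SOURCE A (Python) =====
-- def extract_length_distribution(word_list):
--     length_list = [len(a.split()) for a in word_list]
--     distance = 20
--     length_interval = [[a*distance, a*distance+distance, 0] for a in range(21)]
--     length_interval[-1][1] = 10000000
--     for each_length in length_list:
--         found = False
--         for idx in range(len(length_interval)):
--             if found:
--                 continue
--             if (length_interval[idx][0] <= each_length) and (each_length < length_interval[idx][1]):
--                 length_interval[idx][2] += 1
--                 found = True
--     return length_interval
-- ===== SOURCE B (Python) =====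
-- def extract_length_distribution(word_list):
--     lengths = [len(s.split()) for s in word_list]
--     bounds = [(a * 20, a * 20 + 20) for a in range(20)] + [(400, 10000000)]
--     return [[lo, hi, sum(lo <= n < hi for n in lengths)] for lo, hi in bounds]
-- ===== Notes on version B (the rewrite author's own statement) =====
-- stated objective: simpler
-- what changed: Inverts the loops: instead of scanning the 21 intervals per word with a found flag, B computes each interval's count directly as the number of word lengths falling in its range.
import Mathlib
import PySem

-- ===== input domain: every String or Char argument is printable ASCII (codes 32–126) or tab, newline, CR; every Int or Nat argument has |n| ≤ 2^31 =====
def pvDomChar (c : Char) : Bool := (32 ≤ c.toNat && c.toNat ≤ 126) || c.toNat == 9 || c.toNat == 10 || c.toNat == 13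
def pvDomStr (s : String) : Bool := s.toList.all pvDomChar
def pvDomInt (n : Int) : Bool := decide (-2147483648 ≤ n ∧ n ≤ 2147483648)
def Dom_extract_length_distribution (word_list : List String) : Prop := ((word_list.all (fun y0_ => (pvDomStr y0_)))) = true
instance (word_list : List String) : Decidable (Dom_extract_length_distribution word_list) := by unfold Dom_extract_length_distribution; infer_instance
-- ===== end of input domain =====

-- B inverts the loops: instead of A's per-word scan over the 21 intervals with a found flag,
-- B computes each interval's count directly as the number of word lengths in its range (simpler).

-- ===== PORT A =====
-- inner loop body: 'for idx in range(len(length_interval)): if found: continue; if lo <= l < hi: bump; found = True'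
def pvStepA (each_length : Int) (st : List (List Int) × Bool) (idx : Nat) : List (List Int) × Bool :=
  if st.2 then st
  else if (st.1.getD idx []).getD 0 0 ≤ each_length ∧ each_length < (st.1.getD idx []).getD 1 0 then
    (st.1.modify idx (fun r => r.set 2 (r.getD 2 0 + 1)), true)
  else st

def extract_length_distribution (word_list : List String) : List (List Int) :=
  let length_list : List Int := word_list.map (fun a => ((PySem.Str.split₀ a).length : Int))
  let distance : Int := 20
  let t0 := (PySem.List.pyRange 0 21 1).map (fun a => [a * distance, a * distance + distance, (0 : Int)])
  -- length_interval[-1][1] = 10000000 : index -1 is the last row (always in range, the table has 21 rows)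
  let t1 := t0.modify (t0.length - 1) (fun r => r.set 1 10000000)
  length_list.foldl (fun t each_length => ((List.range t.length).foldl (pvStepA each_length) (t, false)).1) t1

-- ===== PORT B =====
def extract_length_distribution_alt (word_list : List String) : List (List Int) :=
  let lengths : List Int := word_list.map (fun s => ((PySem.Str.split₀ s).length : Int))
  let bounds : List (Int × Int) :=
    ((PySem.List.pyRange 0 20 1).map (fun a => (a * 20, a * 20 + 20))) ++ [(400, 10000000)]
  bounds.map (fun p => [p.1, p.2,
    lengths.foldl (fun acc n => acc + (if p.1 ≤ n ∧ n < p.2 then 1 else 0)) 0])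

-- ===== PRECONDITION & SPEC =====
def Spec_extract_length_distribution (word_list : List String) (out : List (List Int)) : Prop := out = extract_length_distribution_alt word_list
instance (word_list : List String) (out : List (List Int)) : Decidable (Spec_extract_length_distribution word_list out) := by unfold Spec_extract_length_distribution; infer_instance

-- ===== CLAIM (what is proved, stated in full; the proofs are below) =====
def Claim_equal_extract_length_distribution : Prop := ∀ (word_list : List String), Dom_extract_length_distribution word_list → Spec_extract_length_distribution word_list (extract_length_distribution word_list)

-- ===== LEMMAS AND PROOFS =====

lemma lengths_split (wl : List String) :
    wl.map (fun s => ((PySem.Str.split₀ s).length : Int))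
      = (wl.map (fun s => (PySem.Str.split₀ s).length)).map (fun n : Nat => (n : Int)) := by
  simp [List.map_map, Function.comp]

-- upper bound of row i
def hiI (i : Nat) : Int := if i = 20 then 10000000 else 20 * (i : Int) + 20

-- the table with count f i in row i
def mkTable (f : Nat → Int) : List (List Int) :=
  (List.range 21).map (fun i : Nat => [20 * (i : Int), hiI i, f i])

-- membership of a length in bin i, as a Nat predicate
def pIn (i n : Nat) : Bool := decide (20 * i ≤ n ∧ n < (if i = 20 then 10000000 else 20 * i + 20))

-- row-bound shape invariant of the table (counts arbitrary)
def pvShape (t : List (List Int)) : Prop :=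
  t.length = 21 ∧ ∀ i, i < 21 →
    (t.getD i []).getD 0 0 = 20 * (i : Int) ∧
    (t.getD i []).getD 1 0 = (if i = 20 then 10000000 else 20 * (i : Int) + 20) ∧
    (t.getD i []).length = 3

lemma mk_getD (f : Nat → Int) (i : Nat) (h : i < 21) :
    (mkTable f).getD i [] = [20 * (i : Int), hiI i, f i] := by
  unfold mkTable
  rw [List.getD_eq_getElem?_getD]
  simp [h]

lemma pvShape_mk (f : Nat → Int) : pvShape (mkTable f) := by
  refine ⟨by simp [mkTable], ?_⟩
  intro i hi
  rw [mk_getD f i hi]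
  exact ⟨rfl, rfl, rfl⟩

lemma mkTable_congr (f g : Nat → Int) (h : ∀ i, i < 21 → f i = g i) :
    mkTable f = mkTable g := by
  unfold mkTable
  apply List.map_congr_left
  intro i hi
  rw [List.mem_range] at hi
  rw [h i hi]

lemma mk_modify (f : Nat → Int) (j : Nat) (hj : j < 21) :
    (mkTable f).modify j (fun r => r.set 2 (r.getD 2 0 + 1))
      = mkTable (fun i => f i + if i = j then 1 else 0) := by
  apply List.ext_getElem
  · simp [mkTable]
  · intro i h1 h2
    simp only [mkTable, List.length_map, List.length_range] at h1 h2
    rw [List.getElem_modify]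
    by_cases hij : j = i <;> simp [mkTable, hij] <;> omega

lemma foldl_stepA_found (el : Int) (L : List Nat) (t : List (List Int)) :
    L.foldl (pvStepA el) (t, true) = (t, true) := by
  induction L with
  | nil => rfl
  | cons a L ih => simp [List.foldl, pvStepA, ih]

lemma foldl_stepA_none (el : Int) (L : List Nat) (t : List (List Int))
    (h : ∀ i ∈ L, ¬ ((t.getD i []).getD 0 0 ≤ el ∧ el < (t.getD i []).getD 1 0)) :
    L.foldl (pvStepA el) (t, false) = (t, false) := by
  induction L with
  | nil => rfl
  | cons a L ih =>
    have ha := h a (by simp)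
    simp only [List.foldl, pvStepA, if_neg ha]
    exact ih (fun i hi => h i (by simp [hi]))

lemma stepA_eq (t : List (List Int)) (h : pvShape t) (n : Nat) :
    ((List.range t.length).foldl (pvStepA (n : Int)) (t, false)).1 =
      (if (n : Int) < 10000000 then
        t.modify (min (n / 20) 20) (fun r => r.set 2 (r.getD 2 0 + 1)) else t) := by
  obtain ⟨hlen, hrow⟩ := h
  rw [hlen]
  by_cases hn : (n : Int) < 10000000
  · have hn' : n < 10000000 := by exact_mod_cast hn
    set i := min (n / 20) 20 with hi
    have hi20 : i ≤ 20 := by omega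
    have hsplit : List.range 21 = List.range i ++ (List.range (21 - i)).map (i + ·) := by
      rw [← List.range_add]; congr 1; omega
    have hcons : (List.range (21 - i)).map (i + ·) = i :: (List.range (20 - i)).map (fun k => i + (k + 1)) := by
      have : 21 - i = (20 - i) + 1 := by omega
      rw [this, List.range_succ_eq_map]
      simp [List.map_map, Function.comp]
    rw [hsplit, hcons, List.foldl_append]
    rw [foldl_stepA_none _ _ _ ?_]
    · -- hit at index i
      have hbi := hrow i (by omega)
      have hguard : (t.getD i []).getD 0 0 ≤ (n : Int) ∧ (n : Int) < (t.getD i []).getD 1 0 := by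
        rw [hbi.1, hbi.2.1]
        constructor
        · have : 20 * i ≤ n := by omega
          exact_mod_cast this
        · split_ifs with h20
          · exact hn
          · have : n < 20 * i + 20 := by omega
            exact_mod_cast this
      simp only [List.foldl, pvStepA, Bool.false_eq_true, if_false, if_pos hguard]
      rw [foldl_stepA_found]
      simp only [if_pos hn]
    · intro j hj
      simp only [List.mem_range] at hj
      have hb := hrow j (by omega)
      rw [hb.1, hb.2.1]
      rintro ⟨h1, h2⟩
      have hj20 : j ≠ 20 := by omega
      rw [if_neg hj20] at h2
      have h2' : n < 20 * j + 20 := by exact_mod_cast h2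
      omega
  · rw [if_neg hn]
    rw [foldl_stepA_none]
    intro j hj
    simp only [List.mem_range] at hj
    have hb := hrow j (by omega)
    rw [hb.1, hb.2.1]
    rintro ⟨h1, h2⟩
    split_ifs at h2 with h20
    · omega
    · have h2' : n < 20 * j + 20 := by exact_mod_cast h2
      have : (n : Int) < 10000000 := by exact_mod_cast (by omega : n < 10000000)
      omega

lemma pIn_iff (i n : Nat) (hi : i < 21) (hn : n < 10000000) :
    pIn i n = true ↔ i = min (n / 20) 20 := by
  unfold pIn
  rw [decide_eq_true_iff]
  by_cases h20 : i = 20 <;> simp [h20] <;> omega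

lemma pIn_false (i n : Nat) (hi : i < 21) (hn : ¬ n < 10000000) :
    pIn i n = false := by
  unfold pIn
  simp only [decide_eq_false_iff_not]
  by_cases h20 : i = 20 <;> simp [h20] <;> omega

-- A's fold over the lengths, starting from a table with counts f
lemma foldA_mk (ls : List Nat) : ∀ f : Nat → Int,
    (ls.map (fun n : Nat => (n : Int))).foldl
      (fun t each_length => ((List.range t.length).foldl (pvStepA each_length) (t, false)).1)
      (mkTable f)
    = mkTable (fun i => f i + ((ls.countP (pIn i) : Nat) : Int)) := by
  induction ls with
  | nil =>
    intro f
    simp only [List.map_nil, List.foldl_nil, List.countP_nil]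
    exact mkTable_congr _ _ (fun i _ => by simp)
  | cons n ls ih =>
    intro f
    simp only [List.map_cons, List.foldl_cons]
    rw [stepA_eq _ (pvShape_mk f) n]
    by_cases hn : n < 10000000
    · rw [if_pos (by exact_mod_cast hn)]
      rw [mk_modify f (min (n / 20) 20) (by omega)]
      rw [ih]
      apply mkTable_congr
      intro i hi
      rw [List.countP_cons]
      by_cases hij : i = min (n / 20) 20
      · have hT : pIn i n = true := (pIn_iff i n hi hn).mpr hij
        subst hij
        simp only [hT, if_pos rfl, if_true]
        push_cast
        ring
      · have hF : pIn i n = false := by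
          cases h : pIn i n
          · rfl
          · exact absurd ((pIn_iff i n hi hn).mp h) hij
        simp [hij, hF]
    · rw [if_neg (by exact_mod_cast hn)]
      rw [ih]
      apply mkTable_congr
      intro i hi
      rw [List.countP_cons, pIn_false i n hi hn]
      simp

-- B's per-bin sum equals countP
lemma sum_eq_countP (i : Nat) (hi : i < 21) (ls : List Nat) : ∀ acc : Int,
    (ls.map (fun n : Nat => (n : Int))).foldl
      (fun acc n => acc + (if 20 * (i : Int) ≤ n ∧ n < hiI i then 1 else 0)) acc
    = acc + ((ls.countP (pIn i) : Nat) : Int) := by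
  induction ls with
  | nil => intro acc; simp
  | cons n ls ih =>
    intro acc
    simp only [List.map_cons, List.foldl_cons, List.countP_cons]
    rw [ih]
    have hcond : (20 * (i : Int) ≤ (n : Int) ∧ (n : Int) < hiI i) ↔ pIn i n = true := by
      unfold hiI pIn
      rw [decide_eq_true_iff]
      by_cases h20 : i = 20 <;> simp [h20] <;> constructor <;> intro h <;> exact_mod_cast h
    by_cases hc : pIn i n = true
    · rw [if_pos (hcond.mpr hc), hc]
      simp only [if_pos trivial]
      push_cast
      ring
    · have hF : pIn i n = false := by
        cases h : pIn i n
        · rfl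
        · exact absurd h hc
      rw [if_neg (fun hx => hc (hcond.mp hx)), hF]
      simp

lemma alt_eq (wl : List String) :
    extract_length_distribution_alt wl
      = mkTable (fun i => (((wl.map (fun s => (PySem.Str.split₀ s).length)).countP (pIn i) : Nat) : Int)) := by
  unfold extract_length_distribution_alt
  have hbounds : (((PySem.List.pyRange 0 20 1).map (fun a => (a * 20, a * 20 + 20))) ++ [((400 : Int), (10000000 : Int))])
      = (List.range 21).map (fun i : Nat => (20 * (i : Int), hiI i)) := by decide
  rw [hbounds]
  unfold mkTable
  rw [List.map_map]
  apply List.map_congr_left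
  intro i hmem
  rw [List.mem_range] at hmem
  simp only [Function.comp]
  congr 1
  congr 1
  rw [lengths_split wl, sum_eq_countP i hmem]
  simp

-- ===== VERDICT (by name: the statement is the Claim_ definition above) =====
theorem extract_length_distribution_spec : Claim_equal_extract_length_distribution := by
  intro word_list _
  unfold Spec_extract_length_distribution
  have htab : ((PySem.List.pyRange 0 21 1).map (fun a => [a * 20, a * 20 + 20, (0 : Int)])).modify
      (((PySem.List.pyRange 0 21 1).map (fun a => [a * 20, a * 20 + 20, (0 : Int)])).length - 1)
      (fun r => r.set 1 10000000) = mkTable (fun _ => 0) := by decide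
  show (List.map (fun a => ((PySem.Str.split₀ a).length : Int)) word_list).foldl
      (fun t each_length => ((List.range t.length).foldl (pvStepA each_length) (t, false)).1)
      (((PySem.List.pyRange 0 21 1).map (fun a => [a * 20, a * 20 + 20, (0 : Int)])).modify
        (((PySem.List.pyRange 0 21 1).map (fun a => [a * 20, a * 20 + 20, (0 : Int)])).length - 1)
        (fun r => r.set 1 10000000))
    = extract_length_distribution_alt word_list
  rw [htab, lengths_split word_list, foldA_mk, alt_eq]
  exact mkTable_congr _ _ (fun i _ => by simp)
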